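-- pv_equiv track=rewrite | github.com/vrathod07/NLP_Assignments | assignment2/tokens.py | combine_word_handler
-- ===== SOURCE A (Python) =====
-- def combine_word_handler( token ):
--     words = token.split(' ')
--     new_token = ""
--
--     combine1 = ""
--     combine2 = ""
--     # combine word with single character
--     for word in words:
--         if( len(word) == 1 ):
--             combine1 += word
--             if( combine2 ):
--                 new_token += combine2 + ' '
--                 combine2 = ""
--
--         elif( len(word) == 2 and word[1] == '.' ):
--             combine2 += word
--             if( combine1 ):
--                 new_token += combine1 + ' '
--                 combine1 = ""
--
--         else:
--             if( combine1 ):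
--                 new_token += combine1 + ' '
--                 combine1 = ""
--
--             if( combine2 ):
--                 new_token += combine2 + ' '
--                 combine2 = ""
--
--             new_token += word + ' '
--
--     if( combine1 ):
--         new_token += combine1 + ' '
--
--     if( combine2 ):
--         new_token += combine2 + ' '
--
--     return new_token[:-1]
-- ===== SOURCE B (Python) =====
-- def combine_word_handler(token):
--     # Classify each word once, then emit runs of same-category special words
--     # as one joined token; normal words (category 0) are emitted one by one.
--     def cat(w):
--         if len(w) == 1:
--             return 1
--         if len(w) == 2 and w[1] == '.':
--             return 2
--         return 0
--
--     words = token.split(' ')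
--     tokens = []
--     i, n = 0, len(words)
--     while i < n:
--         c = cat(words[i])
--         if c == 0:
--             tokens.append(words[i])
--             i += 1
--         else:
--             j = i + 1
--             while j < n and cat(words[j]) == c:
--                 j += 1
--             tokens.append(''.join(words[i:j]))
--             i = j
--     return ' '.join(tokens)
-- ===== Notes on version B (the rewrite author's own statement) =====
-- stated objective: alternative
-- what changed: Replaced A's two cross-flushing string accumulators (combine1/combine2 with mutual flush logic and a trailing-space trim) by a classify-then-group pipeline: each word gets a category, consecutive same-category special words are grouped with an index scan and joined, and the token list is space-joined.
import Mathlib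
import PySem

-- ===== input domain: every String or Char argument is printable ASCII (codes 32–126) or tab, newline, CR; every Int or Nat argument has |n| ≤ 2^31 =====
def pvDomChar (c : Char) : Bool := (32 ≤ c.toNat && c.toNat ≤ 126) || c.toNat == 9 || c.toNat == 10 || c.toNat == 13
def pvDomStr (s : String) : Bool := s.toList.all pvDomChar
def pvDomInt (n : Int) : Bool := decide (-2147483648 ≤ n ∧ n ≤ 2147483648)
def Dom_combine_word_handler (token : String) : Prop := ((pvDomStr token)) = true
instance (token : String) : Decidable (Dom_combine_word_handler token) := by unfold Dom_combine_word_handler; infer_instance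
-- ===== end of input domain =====

-- B replaces A's two cross-flushing string accumulators by a classify-then-group-then-join
-- pipeline of the same cost (objective: alternative).

-- ===== PORT A =====
-- the body of A's `for word in words` loop, acting on (new_token, combine1, combine2)
def pvStepA (st : String × String × String) (word : String) : String × String × String :=
  let new_token := st.1
  let combine1 := st.2.1
  let combine2 := st.2.2
  if PySem.Str.len word = 1 then
    let combine1 := combine1 ++ word
    if combine2 ≠ "" then (new_token ++ combine2 ++ " ", combine1, "")
    else (new_token, combine1, combine2)
  else if PySem.Str.len word = 2 ∧ PySem.Str.pyGet? word 1 = some '.' then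
    let combine2 := combine2 ++ word
    if combine1 ≠ "" then (new_token ++ combine1 ++ " ", "", combine2)
    else (new_token, combine1, combine2)
  else
    let new_token := if combine1 ≠ "" then new_token ++ combine1 ++ " " else new_token
    let new_token := if combine2 ≠ "" then new_token ++ combine2 ++ " " else new_token
    (new_token ++ word ++ " ", "", "")

-- the two `if combine…:` flushes after the loop
def pvFlushA (st : String × String × String) : String :=
  let new_token := if st.2.1 ≠ "" then st.1 ++ st.2.1 ++ " " else st.1
  if st.2.2 ≠ "" then new_token ++ st.2.2 ++ " " else new_token

def combine_word_handler (token : String) : String :=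
  let words := (PySem.Str.split? token " ").getD []  -- the separator is a nonempty single-space string, so split? is always `some`
  PySem.Str.slice (pvFlushA (words.foldl pvStepA ("", "", ""))) none (some (-1))  -- new_token[:-1]

-- ===== PORT B =====
-- B's `cat(w)`
def pvCat (w : String) : Nat :=
  if PySem.Str.len w = 1 then 1
  else if PySem.Str.len w = 2 ∧ PySem.Str.pyGet? w 1 = some '.' then 2
  else 0

-- B's outer while-loop over the word list: the inner while computes j as i+1 plus the
-- number of immediately following words of the same category, so words[i:j] is
-- words[i] :: takeWhile and the loop resumes at dropWhile (exact for the index scan).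
def pvGroup : List String → List String
  | [] => []
  | w :: rest =>
    if pvCat w = 0 then w :: pvGroup rest
    else
      PySem.Str.join "" (w :: rest.takeWhile (fun x => pvCat x = pvCat w)) ::
        pvGroup (rest.dropWhile (fun x => pvCat x = pvCat w))
termination_by ws => ws.length
decreasing_by
  · simp
  · have := List.length_dropWhile_le (fun x => decide (pvCat x = pvCat w)) rest
    simp only [List.length_cons]
    omega

def combine_word_handler_alt (token : String) : String :=
  PySem.Str.join " " (pvGroup ((PySem.Str.split? token " ").getD []))

-- ===== PRECONDITION & SPEC =====
def Spec_combine_word_handler (token : String) (out : String) : Prop := out = combine_word_handler_alt token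
instance (token : String) (out : String) : Decidable (Spec_combine_word_handler token out) := by unfold Spec_combine_word_handler; infer_instance

-- ===== CLAIM (what is proved, stated in full; the proofs are below) =====
def Claim_equal_combine_word_handler : Prop := ∀ (token : String), Dom_combine_word_handler token → Spec_combine_word_handler token (combine_word_handler token)

-- ===== LEMMAS AND PROOFS =====

-- A's loop state, reconstructed from an optional pending run (category, buffer)
def pvStateOf (nt : String) : Option (Nat × String) → String × String × String
  | none => (nt, "", "")
  | some (c, buf) => if c = 1 then (nt, buf, "") else (nt, "", buf)

-- invariant on the pending run: category is 1 or 2 and the buffer is nonempty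
def pvPOK : Option (Nat × String) → Prop
  | none => True
  | some (c, buf) => (c = 1 ∨ c = 2) ∧ buf ≠ ""

-- the token sequence both programs emit, with a pending run carried along
def pvRun : Option (Nat × String) → List String → List String
  | none, [] => []
  | some (_, buf), [] => [buf]
  | p, w :: ws =>
    if pvCat w = 0 then
      (match p with | none => [] | some (_, buf) => [buf]) ++ w :: pvRun none ws
    else
      match p with
      | none => pvRun (some (pvCat w, w)) ws
      | some (c', buf) =>
        if c' = pvCat w then pvRun (some (pvCat w, buf ++ w)) ws
        else buf :: pvRun (some (pvCat w, w)) ws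

-- every token followed by a space, concatenated (the shape A's accumulator builds)
def pvSconcat (ts : List String) : String := ts.foldr (fun t acc => t ++ " " ++ acc) ""

theorem pv_empty_toList : ("" : String).toList = [] := by decide

theorem pv_ne_empty_iff (a : String) : a ≠ "" ↔ a.toList ≠ [] := by
  constructor
  · intro h h2
    exact h (String.toList_inj.mp (by rw [h2, pv_empty_toList]))
  · intro h h2
    exact h (by rw [h2, pv_empty_toList])

theorem pv_append_ne_empty (a b : String) (h : a ≠ "") : a ++ b ≠ "" := by
  rw [pv_ne_empty_iff] at h ⊢
  rw [String.toList_append]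
  simp [h]

theorem pvCat_one_ne_empty {w : String} (h : PySem.Str.len w = 1) : w ≠ "" := by
  have hl := PySem.Str.len_eq w
  rw [pv_ne_empty_iff]
  intro h'
  rw [h, h'] at hl
  simp at hl

theorem pvCat_two_ne_empty {w : String} (h : PySem.Str.len w = 2) : w ≠ "" := by
  have hl := PySem.Str.len_eq w
  rw [pv_ne_empty_iff]
  intro h'
  rw [h, h'] at hl
  simp at hl

theorem pvCat_ne_empty {w : String} (h : pvCat w ≠ 0) : w ≠ "" := by
  unfold pvCat at h
  split_ifs at h with hA hB
  · exact pvCat_one_ne_empty hA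
  · exact pvCat_two_ne_empty hB.1
  · simp at h

theorem pvCat_cases (w : String) : pvCat w = 0 ∨ pvCat w = 1 ∨ pvCat w = 2 := by
  unfold pvCat
  split_ifs <;> simp

-- A's loop body, characterised by the category of the incoming word
theorem pvStepA_zero {w : String} (h : pvCat w = 0) (st : String × String × String) :
    pvStepA st w = (pvFlushA st ++ w ++ " ", "", "") := by
  unfold pvCat at h
  unfold pvStepA pvFlushA
  split_ifs at h ⊢ <;> simp_all

theorem pvStepA_one {w : String} (h : pvCat w = 1) (st : String × String × String) :
    pvStepA st w = if st.2.2 ≠ "" then (st.1 ++ st.2.2 ++ " ", st.2.1 ++ w, "")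
      else (st.1, st.2.1 ++ w, st.2.2) := by
  unfold pvCat at h
  unfold pvStepA
  split_ifs at h ⊢ <;> simp_all

theorem pvStepA_two {w : String} (h : pvCat w = 2) (st : String × String × String) :
    pvStepA st w = if st.2.1 ≠ "" then (st.1 ++ st.2.1 ++ " ", "", st.2.2 ++ w)
      else (st.1, st.2.1, st.2.2 ++ w) := by
  unfold pvCat at h
  unfold pvStepA
  split_ifs at h ⊢ <;> simp_all

theorem pvSconcat_cons (t : String) (ts : List String) :
    pvSconcat (t :: ts) = t ++ " " ++ pvSconcat ts := rfl

-- A's loop + final flushes compute exactly the pending-run token stream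
theorem pvA_run (ws : List String) : ∀ (nt : String) (p : Option (Nat × String)), pvPOK p →
    pvFlushA (ws.foldl pvStepA (pvStateOf nt p)) = nt ++ pvSconcat (pvRun p ws) := by
  induction ws with
  | nil =>
    rintro nt (_ | ⟨c, buf⟩) hp
    · simp [pvStateOf, pvFlushA, pvRun, pvSconcat]
    · obtain ⟨hc, hbuf⟩ := hp
      rcases hc with hc | hc <;>
        simp [hc, pvStateOf, pvFlushA, pvRun, pvSconcat, hbuf, String.append_assoc]
  | cons w ws ih =>
    rintro nt (_ | ⟨c, buf⟩) hp <;> simp only [List.foldl_cons]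
    · rcases pvCat_cases w with h0 | h1 | h2
      · rw [show pvStepA (pvStateOf nt none) w = pvStateOf (nt ++ w ++ " ") none by
            rw [pvStepA_zero h0]; simp [pvStateOf, pvFlushA]]
        rw [ih (nt ++ w ++ " ") none trivial]
        simp [pvRun, h0, pvSconcat_cons, String.append_assoc]
      · have hw : w ≠ "" := pvCat_ne_empty (by omega)
        rw [show pvStepA (pvStateOf nt none) w = pvStateOf nt (some (1, w)) by
            rw [pvStepA_one h1]; simp [pvStateOf]]
        rw [ih nt (some (1, w)) ⟨Or.inl rfl, hw⟩]
        simp [pvRun, h1]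
      · have hw : w ≠ "" := pvCat_ne_empty (by omega)
        rw [show pvStepA (pvStateOf nt none) w = pvStateOf nt (some (2, w)) by
            rw [pvStepA_two h2]; simp [pvStateOf]]
        rw [ih nt (some (2, w)) ⟨Or.inr rfl, hw⟩]
        simp [pvRun, h2]
    · obtain ⟨hc, hbuf⟩ := hp
      rcases pvCat_cases w with h0 | h1 | h2
      · rcases hc with hc | hc <;> subst hc
        · rw [show pvStepA (pvStateOf nt (some (1, buf))) w
              = pvStateOf (nt ++ buf ++ " " ++ w ++ " ") none by
              rw [pvStepA_zero h0]; simp [pvStateOf, pvFlushA, hbuf]]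
          rw [ih _ none trivial]
          simp [pvRun, h0, pvSconcat_cons, String.append_assoc]
        · rw [show pvStepA (pvStateOf nt (some (2, buf))) w
              = pvStateOf (nt ++ buf ++ " " ++ w ++ " ") none by
              rw [pvStepA_zero h0]; simp [pvStateOf, pvFlushA, hbuf]]
          rw [ih _ none trivial]
          simp [pvRun, h0, pvSconcat_cons, String.append_assoc]
      · have hw : w ≠ "" := pvCat_ne_empty (by omega)
        rcases hc with hc | hc <;> subst hc
        · rw [show pvStepA (pvStateOf nt (some (1, buf))) w
              = pvStateOf nt (some (1, buf ++ w)) by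
              rw [pvStepA_one h1]; simp [pvStateOf]]
          rw [ih nt (some (1, buf ++ w)) ⟨Or.inl rfl, pv_append_ne_empty _ _ hbuf⟩]
          simp [pvRun, h1]
        · rw [show pvStepA (pvStateOf nt (some (2, buf))) w
              = pvStateOf (nt ++ buf ++ " ") (some (1, w)) by
              rw [pvStepA_one h1]; simp [pvStateOf, hbuf]]
          rw [ih (nt ++ buf ++ " ") (some (1, w)) ⟨Or.inl rfl, hw⟩]
          simp [pvRun, h1, pvSconcat_cons, String.append_assoc]
      · have hw : w ≠ "" := pvCat_ne_empty (by omega)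
        rcases hc with hc | hc <;> subst hc
        · rw [show pvStepA (pvStateOf nt (some (1, buf))) w
              = pvStateOf (nt ++ buf ++ " ") (some (2, w)) by
              rw [pvStepA_two h2]; simp [pvStateOf, hbuf]]
          rw [ih (nt ++ buf ++ " ") (some (2, w)) ⟨Or.inr rfl, hw⟩]
          simp [pvRun, h2, pvSconcat_cons, String.append_assoc]
        · rw [show pvStepA (pvStateOf nt (some (2, buf))) w
              = pvStateOf nt (some (2, buf ++ w)) by
              rw [pvStepA_two h2]; simp [pvStateOf]]
          rw [ih nt (some (2, buf ++ w)) ⟨Or.inr rfl, pv_append_ne_empty _ _ hbuf⟩]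
          simp [pvRun, h2]

theorem pv_join_empty_nil : PySem.Str.join "" ([] : List String) = "" := by
  simp [← String.toList_inj, PySem.Str.toList_join, PySem.Chars.join_nil]

theorem pv_join_empty_cons (x : String) (l : List String) :
    PySem.Str.join "" (x :: l) = x ++ PySem.Str.join "" l := by
  cases l with
  | nil => simp [← String.toList_inj, PySem.Str.toList_join, PySem.Chars.join_singleton,
      PySem.Chars.join_nil]
  | cons y l => simp [← String.toList_inj, PySem.Str.toList_join, String.toList_append,
      PySem.Chars.join_cons_cons]

-- the pending-run token stream is B's group list
theorem pvRun_group (n : Nat) : ∀ (ws : List String), ws.length ≤ n →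
    (pvRun none ws = pvGroup ws ∧
     ∀ (c : Nat) (buf : String), c ≠ 0 →
       pvRun (some (c, buf)) ws
         = (buf ++ PySem.Str.join "" (ws.takeWhile (fun x => pvCat x = c)))
           :: pvGroup (ws.dropWhile (fun x => pvCat x = c))) := by
  induction n with
  | zero =>
    intro ws hws
    have : ws = [] := List.eq_nil_of_length_eq_zero (Nat.le_zero.mp hws)
    subst this
    exact ⟨by simp [pvRun, pvGroup], fun c buf _ => by simp [pvRun, pvGroup, pv_join_empty_nil]⟩
  | succ n ih =>
    intro ws hws
    cases ws with
    | nil =>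
      exact ⟨by simp [pvRun, pvGroup], fun c buf _ => by simp [pvRun, pvGroup, pv_join_empty_nil]⟩
    | cons w ws =>
      have hlen : ws.length ≤ n := by simpa using Nat.lt_succ_iff.mp (Nat.lt_of_lt_of_le (by simp) hws)
      constructor
      · by_cases h0 : pvCat w = 0
        · simp [pvRun, pvGroup, h0, (ih ws hlen).1]
        · rw [show pvRun none (w :: ws) = pvRun (some (pvCat w, w)) ws by simp [pvRun, h0]]
          rw [(ih ws hlen).2 (pvCat w) w h0]
          simp [pvGroup, h0, pv_join_empty_cons]
      · intro c buf hc
        by_cases h0 : pvCat w = 0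
        · have hne : ¬ pvCat w = c := by omega
          have hc' : ¬ (0 = c) := fun h => hc h.symm
          simp [pvRun, pvGroup, h0, hne, hc', (ih ws hlen).1, pv_join_empty_nil,
            List.takeWhile_cons, List.dropWhile_cons]
        · by_cases hcc : c = pvCat w
          · subst hcc
            rw [show pvRun (some (pvCat w, buf)) (w :: ws)
                = pvRun (some (pvCat w, buf ++ w)) ws by simp [pvRun, h0]]
            rw [(ih ws hlen).2 (pvCat w) (buf ++ w) h0]
            simp [List.takeWhile_cons, List.dropWhile_cons, pv_join_empty_cons,
              String.append_assoc]
          · rw [show pvRun (some (c, buf)) (w :: ws)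
                = buf :: pvRun (some (pvCat w, w)) ws by simp [pvRun, h0, hcc]]
            rw [(ih ws hlen).2 (pvCat w) w h0]
            have hne : ¬ pvCat w = c := fun h => hcc h.symm
            simp [pvGroup, h0, hne, pv_join_empty_cons, pv_join_empty_nil]

theorem pv_flatten_dropLast (l : List (List Char)) :
    (l.map (fun t => t ++ [' '])).flatten.dropLast = PySem.Chars.join [' '] l := by
  induction l with
  | nil => simp [PySem.Chars.join_nil]
  | cons p l ih =>
    cases l with
    | nil => simp [PySem.Chars.join_singleton]
    | cons q l =>
      have hne : ((q :: l).map (fun t => t ++ [' '])).flatten ≠ [] := by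
        simp
      rw [List.map_cons, List.flatten_cons, List.dropLast_append_of_ne_nil hne, ih,
        PySem.Chars.join_cons_cons]

theorem pv_sconcat_toList (ts : List String) :
    (pvSconcat ts).toList = ((ts.map String.toList).map (fun t => t ++ [' '])).flatten := by
  induction ts with
  | nil => simp [pvSconcat]
  | cons t ts ih =>
    have h : pvSconcat (t :: ts) = t ++ " " ++ pvSconcat ts := rfl
    rw [h, String.toList_append, String.toList_append, ih]
    simp

-- trimming the trailing space off A's accumulator is ' '.join of the token list
theorem pv_sconcat_slice (ts : List String) :
    PySem.Str.slice (pvSconcat ts) none (some (-1)) = PySem.Str.join " " ts := by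
  rw [← String.toList_inj, PySem.Str.slice_to_neg_one, PySem.Str.toList_join,
    pv_sconcat_toList, pv_flatten_dropLast]
  rfl

-- ===== VERDICT (by name: the statement is the Claim_ definition above) =====
theorem combine_word_handler_spec : Claim_equal_combine_word_handler := by
  intro token _
  have hA := pvA_run ((PySem.Str.split? token " ").getD []) "" none trivial
  simp only [pvStateOf] at hA
  show PySem.Str.slice
      (pvFlushA (((PySem.Str.split? token " ").getD []).foldl pvStepA ("", "", "")))
      none (some (-1))
    = PySem.Str.join " " (pvGroup ((PySem.Str.split? token " ").getD []))
  rw [hA, String.empty_append, (pvRun_group _ _ le_rfl).1, pv_sconcat_slice]
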